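-- pv_equiv track=rewrite | github.com/AkiraKatzaki/Py | Sem1/Task1.py | get_n_numbers
-- ===== SOURCE A (Python) =====
-- def get_n_numbers(num_n):
--     if num_n <= 0:
--         return []
--     list_n = [1]
--     product = 1
--     for i in range(num_n - 1):
--         product *= -3
--         list_n.append(product)
--     return list_n
-- ===== SOURCE B (Python) =====
-- def get_n_numbers(num_n):
--     return [(-3) ** i for i in range(num_n)]
-- ===== Notes on version B (the rewrite author's own statement) =====
-- stated objective: idiomatic
-- what changed: Replaced the running-product accumulator loop with its separate early return and seeded initial list by a single comprehension computing each element independently as a direct power of -3 over range(num_n).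
import Mathlib
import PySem

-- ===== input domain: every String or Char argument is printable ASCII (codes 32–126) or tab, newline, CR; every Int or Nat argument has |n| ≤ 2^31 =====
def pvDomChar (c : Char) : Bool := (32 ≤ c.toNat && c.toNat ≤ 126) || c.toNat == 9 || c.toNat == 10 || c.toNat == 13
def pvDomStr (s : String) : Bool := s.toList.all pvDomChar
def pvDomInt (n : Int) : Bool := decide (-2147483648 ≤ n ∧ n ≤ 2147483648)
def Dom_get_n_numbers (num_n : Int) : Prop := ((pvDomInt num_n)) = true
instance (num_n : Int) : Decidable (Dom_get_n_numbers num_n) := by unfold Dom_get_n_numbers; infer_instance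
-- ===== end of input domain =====

-- B computes each element independently as (-3)^i over range(num_n) instead of A's
-- running-product accumulator with a separate num_n<=0 early return (idiomatic rewrite).

-- ===== PORT A =====
def get_n_numbers (num_n : Int) : List Int :=
  if num_n ≤ 0 then []
  else
    let st := (PySem.List.pyRange 0 (num_n - 1) 1).foldl
      (fun (st : List Int × Int) _ =>
        let product := st.2 * (-3)
        (st.1 ++ [product], product))
      ([1], 1)
    st.1

-- ===== PORT B =====
def get_n_numbers_alt (num_n : Int) : List Int :=
  (PySem.List.pyRange 0 num_n 1).map (fun i => (-3 : Int) ^ i.toNat)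

-- ===== PRECONDITION & SPEC =====
def Spec_get_n_numbers (num_n : Int) (out : List Int) : Prop := out = get_n_numbers_alt num_n
instance (num_n : Int) (out : List Int) : Decidable (Spec_get_n_numbers num_n out) := by unfold Spec_get_n_numbers; infer_instance

-- ===== CLAIM (what is proved, stated in full; the proofs are below) =====
def Claim_equal_get_n_numbers : Prop := ∀ (num_n : Int), Dom_get_n_numbers num_n → Spec_get_n_numbers num_n (get_n_numbers num_n)

-- ===== LEMMAS AND PROOFS =====

-- A's loop, run over any list of length k from state (acc, p), appends the k next
-- partial products and ends with product p * (-3)^k.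
theorem pvFoldChar (l : List Int) (acc : List Int) (p : Int) :
    l.foldl (fun (st : List Int × Int) _ =>
        let product := st.2 * (-3)
        (st.1 ++ [product], product)) (acc, p)
      = (acc ++ (List.range l.length).map (fun j => p * (-3) ^ (j + 1)),
         p * (-3) ^ l.length) := by
  induction l generalizing acc p with
  | nil => simp
  | cons x xs ih =>
      simp only [List.foldl_cons, ih, List.length_cons]
      rw [List.range_succ_eq_map]
      have hf : ∀ j : ℕ, p * -3 * (-3 : Int) ^ (j + 1) = p * (-3) ^ (j + 1 + 1) := fun j => by ring
      have hp : p * -3 * (-3 : Int) ^ xs.length = p * (-3) ^ (xs.length + 1) := by ring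
      simp only [List.map_cons, List.map_map, Function.comp_def, hf, hp, pow_zero, pow_one,
        zero_add, mul_one, List.append_assoc, List.singleton_append]

theorem get_n_numbers_spec : Claim_equal_get_n_numbers := by
  intro n _
  unfold Spec_get_n_numbers get_n_numbers get_n_numbers_alt
  by_cases h : n ≤ 0
  · simp [h, PySem.List.pyRange, show (n - 0).toNat = 0 by omega]
  · simp only [h, if_false]
    rw [pvFoldChar]
    rw [PySem.List.pyRange_one, PySem.List.pyRange_one]
    have h1 : (n - 1 - 0).toNat = (n - 0).toNat - 1 := by omega
    have h2 : (n - 0).toNat = ((n - 0).toNat - 1) + 1 := by omega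
    rw [h1, List.length_map, List.length_range, h2, List.range_succ_eq_map]
    simp [List.map_map, Function.comp]

-- ===== VERDICT (by name: the statement is the Claim_ definition above) =====
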